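-- pv_equiv track=rewrite | github.com/NathanLoPresto/orserstim | python/src/interfaces/utils.py | count_bytes
-- ===== SOURCE A (Python) =====
-- def count_bytes(num):
--     """Count the number of bytes in a number."""
--
--     bytes = 0
--     if (num == 0):  # if the number equals 0
--         return 1
--     while (num != 0):  # bit shift 8 bits (byte)
--         num >>= 8
--         bytes += 1
--     return bytes
-- ===== SOURCE B (Python) =====
-- def count_bytes(num):
--     """Count the number of bytes in a number."""
--     return (num.bit_length() + 7) // 8 or 1
-- ===== Notes on version B (the rewrite author's own statement) =====
-- stated objective: idiomatic
-- what changed: Replaced the shift-and-count loop with a single closed-form expression over num.bit_length().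
import Mathlib
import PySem

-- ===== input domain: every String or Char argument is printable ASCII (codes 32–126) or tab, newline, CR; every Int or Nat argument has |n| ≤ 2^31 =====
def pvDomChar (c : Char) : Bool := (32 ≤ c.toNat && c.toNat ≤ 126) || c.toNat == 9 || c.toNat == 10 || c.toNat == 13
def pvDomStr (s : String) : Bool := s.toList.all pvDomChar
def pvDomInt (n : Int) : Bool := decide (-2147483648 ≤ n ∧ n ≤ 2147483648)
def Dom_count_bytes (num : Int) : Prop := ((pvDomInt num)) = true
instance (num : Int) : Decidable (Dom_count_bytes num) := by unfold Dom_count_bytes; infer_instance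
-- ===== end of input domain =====

-- B replaces A's shift-and-count loop by the closed form (bit_length + 7) // 8 or 1 (idiomatic);
-- A loops forever on negative num, so Pre_ restricts to 0 ≤ num.


-- ===== PORT A =====
-- the while loop: `while num != 0: num >>= 8; bytes += 1` (num >>= 8 is floor division by 256).
-- Python loops forever on negative num; the `num ≤ 0` guard only makes the recursion total there
-- (those inputs are outside Pre_count_bytes).
def count_bytes_loop (num bytes : Int) : Int :=
  if num = 0 then bytes
  else if _h : num ≤ 0 then bytes
  else count_bytes_loop (PySem.Int.floordiv num 256) (bytes + 1)
termination_by num.toNat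
decreasing_by
  rw [PySem.Int.floordiv_eq_ediv_of_pos (by norm_num)]
  omega

def count_bytes (num : Int) : Int :=
  -- bytes = 0; if num == 0: return 1; while-loop; return bytes
  if num = 0 then 1 else count_bytes_loop num 0

-- ===== PORT B =====
def count_bytes_alt (num : Int) : Int :=
  let q := PySem.Int.floordiv ((PySem.Int.bitLength num : Int) + 7) 8
  if q = 0 then 1 else q   -- Python's `… or 1`

-- ===== PRECONDITION & SPEC =====
-- Pre_ excludes negative num, on which Python A never terminates (the while loop runs forever).
def Pre_count_bytes (num : Int) : Prop := 0 ≤ num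
instance (num : Int) : Decidable (Pre_count_bytes num) := by unfold Pre_count_bytes; infer_instance
def pvWitness_count_bytes : Int := (1000)

def Spec_count_bytes (num : Int) (out : Int) : Prop := out = count_bytes_alt num
instance (num : Int) (out : Int) : Decidable (Spec_count_bytes num out) := by unfold Spec_count_bytes; infer_instance

-- ===== CLAIM (what is proved, stated in full; the proofs are below) =====
def Claim_equal_count_bytes : Prop := ∀ (num : Int), Dom_count_bytes num → Pre_count_bytes num → Spec_count_bytes num (count_bytes num)

-- ===== LEMMAS AND PROOFS =====

-- bracket the bit length of num between powers of two
lemma bitLength_bounds (num : Int) (lo hi : Nat)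
    (h1 : 2 ^ lo ≤ num.natAbs) (h2 : num.natAbs < 2 ^ hi) :
    lo < PySem.Int.bitLength num ∧ PySem.Int.bitLength num ≤ hi := by
  have hne : num ≠ 0 := by
    intro h; subst h; simp at h1
  have ha := PySem.Int.lt_two_pow_bitLength num
  have hb := PySem.Int.two_pow_bitLength_le num hne
  constructor
  · have : (2:Nat) ^ lo < 2 ^ PySem.Int.bitLength num := lt_of_le_of_lt h1 ha
    exact (Nat.pow_lt_pow_iff_right (by norm_num)).mp this
  · have : (2:Nat) ^ (PySem.Int.bitLength num - 1) < 2 ^ hi := lt_of_le_of_lt hb h2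
    have := (Nat.pow_lt_pow_iff_right (by norm_num : 1 < 2)).mp this
    omega

-- B's value on each byte-count band
lemma alt_band (num : Int) (lo hi : Nat) (k : Int)
    (h1 : 2 ^ lo ≤ num.natAbs) (h2 : num.natAbs < 2 ^ hi)
    (hlo : (lo : Int) = 8 * k - 8) (hhi : (hi : Int) = 8 * k) (_hk : 1 ≤ k) :
    count_bytes_alt num = k := by
  obtain ⟨b1, b2⟩ := bitLength_bounds num lo hi h1 h2
  unfold count_bytes_alt
  rw [PySem.Int.floordiv_eq_ediv_of_pos (by norm_num)]
  have : ((PySem.Int.bitLength num : Int) + 7) / 8 = k := by omega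
  rw [this]
  simp only []
  omega

lemma loop_step (num bytes : Int) (h : 0 < num) :
    count_bytes_loop num bytes = count_bytes_loop (num / 256) (bytes + 1) := by
  rw [count_bytes_loop]
  rw [PySem.Int.floordiv_eq_ediv_of_pos (by norm_num)]
  split_ifs with h1 h2 <;> omega

lemma loop_zero (bytes : Int) : count_bytes_loop 0 bytes = bytes := by
  rw [count_bytes_loop]; simp

-- ===== VERDICT (by name: the statement is the Claim_ definition above) =====
theorem count_bytes_spec : Claim_equal_count_bytes := by
  intro num hdom hpre
  unfold Spec_count_bytes
  unfold Dom_count_bytes pvDomInt at hdom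
  simp only [decide_eq_true_eq] at hdom
  unfold Pre_count_bytes at hpre
  unfold count_bytes
  by_cases h0 : num = 0
  · subst h0; decide
  · have hpos : 0 < num := by omega
    have hAbs : (num.natAbs : Int) = num := Int.natAbs_of_nonneg hpre
    rw [if_neg h0]
    -- split into the four byte bands reachable in the domain (num ≤ 2^31 < 2^32)
    rcases lt_or_ge num 256 with hb | hb
    · rw [loop_step _ _ hpos, (by omega : num / 256 = 0), loop_zero]
      exact (alt_band num 0 8 1 (by omega) (by omega) (by norm_num) (by norm_num) (by norm_num)).symm
    · rcases lt_or_ge num 65536 with hc | hc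
      · rw [loop_step _ _ hpos, loop_step _ _ (by omega), (by omega : num / 256 / 256 = 0), loop_zero]
        exact (alt_band num 8 16 2 (by omega) (by omega) (by norm_num) (by norm_num) (by norm_num)).symm
      · rcases lt_or_ge num 16777216 with hd | hd
        · rw [loop_step _ _ hpos, loop_step _ _ (by omega), loop_step _ _ (by omega),
            (by omega : num / 256 / 256 / 256 = 0), loop_zero]
          exact (alt_band num 16 24 3 (by omega) (by omega) (by norm_num) (by norm_num) (by norm_num)).symm
        · rw [loop_step _ _ hpos, loop_step _ _ (by omega), loop_step _ _ (by omega),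
            loop_step _ _ (by omega), (by omega : num / 256 / 256 / 256 / 256 = 0), loop_zero]
          exact (alt_band num 24 32 4 (by omega) (by omega) (by norm_num) (by norm_num) (by norm_num)).symm
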